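-- pv_equiv track=rewrite | github.com/edabruzzo/Challenges_LeetCode | Turing.py | calcElementsArrayPlus1
-- ===== SOURCE A (Python) =====
-- def calcElementsArrayPlus1(arr):
--     valores_unicos = set(arr)
--     lista = []
--     for valor in valores_unicos:
--         if valor + 1 in arr:
--             item_anotado = arr.count(valor)
--             lista.append(item_anotado)
--     return sum(lista)
-- ===== SOURCE B (Python) =====
-- def calcElementsArrayPlus1(arr):
--     # One pass: count elements whose successor is present (set built once).
--     presentes = set(arr)
--     total = 0
--     for x in arr:
--         if x + 1 in presentes:
--             total += 1
--     return total
-- ===== Notes on version B (the rewrite author's own statement) =====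
-- stated objective: faster
-- what changed: Instead of looping over the distinct values and doing a linear 'in arr' membership test plus a linear arr.count for each, B builds a set once and makes a single pass over arr, adding 1 for every element whose successor is in the set (the per-value counts of A are exactly the element-wise 1s of B).
import Mathlib
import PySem

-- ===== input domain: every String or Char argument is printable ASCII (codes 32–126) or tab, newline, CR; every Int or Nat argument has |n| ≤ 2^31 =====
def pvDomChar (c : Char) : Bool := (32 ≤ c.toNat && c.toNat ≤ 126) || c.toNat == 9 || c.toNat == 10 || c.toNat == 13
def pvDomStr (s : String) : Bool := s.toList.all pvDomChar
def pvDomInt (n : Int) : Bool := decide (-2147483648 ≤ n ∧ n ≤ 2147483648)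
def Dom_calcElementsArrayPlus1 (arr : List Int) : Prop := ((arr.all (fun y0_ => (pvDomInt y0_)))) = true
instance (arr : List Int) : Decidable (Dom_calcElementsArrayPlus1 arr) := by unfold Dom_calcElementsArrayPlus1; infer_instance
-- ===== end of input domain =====

-- B replaces A's loop over distinct values (each with a linear membership test and a
-- linear arr.count) by a single pass over arr with a set built once: faster (O(n) vs O(n^2)).

-- ===== PORT A =====
def calcElementsArrayPlus1 (arr : List Int) : Int :=
  let valoresUnicos : PySem.Set Int := PySem.Set.ofList arr
  -- 'for valor in valores_unicos: if valor + 1 in arr: lista.append(arr.count(valor))'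
  -- (iterating the set; the final sum does not depend on the iteration order)
  let lista : List Int := List.foldl (fun acc valor =>
      if arr.contains (valor + 1) then acc ++ [(arr.count valor : Int)] else acc) [] valoresUnicos
  lista.sum

-- ===== PORT B =====
def calcElementsArrayPlus1_alt (arr : List Int) : Int :=
  let presentes : PySem.Set Int := PySem.Set.ofList arr
  List.foldl (fun total x => if PySem.Set.contains presentes (x + 1) then total + 1 else total) 0 arr

-- ===== PRECONDITION & SPEC =====
def Spec_calcElementsArrayPlus1 (arr : List Int) (out : Int) : Prop := out = calcElementsArrayPlus1_alt arr
instance (arr : List Int) (out : Int) : Decidable (Spec_calcElementsArrayPlus1 arr out) := by unfold Spec_calcElementsArrayPlus1; infer_instance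

-- ===== CLAIM (what is proved, stated in full; the proofs are below) =====
def Claim_equal_calcElementsArrayPlus1 : Prop := ∀ (arr : List Int), Dom_calcElementsArrayPlus1 arr → Spec_calcElementsArrayPlus1 arr (calcElementsArrayPlus1 arr)

-- ===== LEMMAS AND PROOFS =====

-- A sums arr.count valor over the distinct values valor with valor+1 ∈ arr; B counts,
-- element by element, the x ∈ arr with x+1 ∈ arr.  These agree because the multiset arr
-- is partitioned by its distinct values (List.sum_map_count_dedup_filter_eq_countP).
theorem calcElementsArrayPlus1_eq_alt (arr : List Int) :
    calcElementsArrayPlus1 arr = calcElementsArrayPlus1_alt arr := by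
  unfold calcElementsArrayPlus1 calcElementsArrayPlus1_alt
  dsimp only
  rw [PySem.List.foldl_append_if, PySem.List.foldl_count_if]
  simp only [List.nil_append, zero_add]
  have hc : ∀ x : Int, PySem.Set.contains (PySem.Set.ofList arr) (x + 1) = arr.contains (x + 1) := by
    intro x
    simp only [PySem.Set.contains_eq_listContains, List.contains_eq_mem, PySem.Set.mem_ofList]
  rw [List.countP_congr (fun x _ => by rw [hc])]
  have hperm : (PySem.Set.ofList arr).Perm arr.dedup := by
    rw [List.perm_ext_iff_of_nodup (PySem.Set.nodup_ofList arr) arr.nodup_dedup]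
    intro a; rw [PySem.Set.mem_ofList, List.mem_dedup]
  rw [(((hperm.filter (fun v => arr.contains (v + 1))).map (fun v => (arr.count v : Int))).sum_eq)]
  rw [show (fun v => (arr.count v : Int)) = (fun n : Nat => (n : Int)) ∘ arr.count from rfl,
      ← List.map_map, ← Nat.cast_list_sum, List.sum_map_count_dedup_filter_eq_countP]

-- ===== VERDICT (by name: the statement is the Claim_ definition above) =====
theorem calcElementsArrayPlus1_spec : Claim_equal_calcElementsArrayPlus1 := by
  intro arr _
  exact calcElementsArrayPlus1_eq_alt arr
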